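-- pv_equiv track=rewrite | github.com/rohujin97/Algorithm_Python | test/1211/test3.py | solution
-- ===== SOURCE A (Python) =====
-- def solution(n):
--
--     if n % 5 == 0:
--         return n // 5
--     else:
--         answer = n // 5
--         while answer >= 0:
--             tmp = n - answer * 5
--             if tmp % 3 == 0:
--                 return answer + tmp // 3
--             answer -= 1
--         return -1
-- ===== SOURCE B (Python) =====
-- def solution(n):
--     if n % 5 == 0:
--         return n // 5
--     # closed form: need a bags of 5, a ≡ 2n (mod 3), largest a ≤ n//5
--     r = (2 * n) % 3
--     a0 = n // 5
--     a = a0 - ((a0 - r) % 3)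
--     if a < 0:
--         return -1
--     return a + (n - 5 * a) // 3
-- ===== Notes on version B (the rewrite author's own statement) =====
-- stated objective: simpler
-- what changed: Replaced the descending scan over candidate five-bag counts with a closed-form modular-arithmetic computation: snap the floor quotient down to the required residue modulo three.
import Mathlib
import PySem

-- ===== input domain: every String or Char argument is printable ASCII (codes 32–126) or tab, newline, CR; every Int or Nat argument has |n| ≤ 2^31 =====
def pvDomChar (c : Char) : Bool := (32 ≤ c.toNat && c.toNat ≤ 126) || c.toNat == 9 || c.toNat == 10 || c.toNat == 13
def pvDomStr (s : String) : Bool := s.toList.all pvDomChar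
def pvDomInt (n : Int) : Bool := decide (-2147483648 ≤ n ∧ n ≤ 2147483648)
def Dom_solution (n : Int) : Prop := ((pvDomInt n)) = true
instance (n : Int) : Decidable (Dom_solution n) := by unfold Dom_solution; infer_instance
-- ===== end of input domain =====

-- B replaces A's descending scan over the five-bag count with a loop-free closed-form modular computation (simpler).

-- ===== PORT A =====
-- the while loop of A: scan answer downwards while answer >= 0
def solutionLoop (n : Int) (answer : Int) : Int :=
  if _h : 0 ≤ answer then
    let tmp := n - answer * 5
    if PySem.Int.mod tmp 3 = 0 then answer + PySem.Int.floordiv tmp 3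
    else solutionLoop n (answer - 1)
  else -1
termination_by (answer + 1).toNat
decreasing_by omega

def solution (n : Int) : Int :=
  if PySem.Int.mod n 5 = 0 then PySem.Int.floordiv n 5
  else solutionLoop n (PySem.Int.floordiv n 5)

-- ===== PORT B =====
def solution_alt (n : Int) : Int :=
  if PySem.Int.mod n 5 = 0 then PySem.Int.floordiv n 5
  else
    let r := PySem.Int.mod (2 * n) 3
    let a0 := PySem.Int.floordiv n 5
    let a := a0 - PySem.Int.mod (a0 - r) 3
    if a < 0 then -1
    else a + PySem.Int.floordiv (n - 5 * a) 3

-- ===== PRECONDITION & SPEC =====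
def Spec_solution (n : Int) (out : Int) : Prop := out = solution_alt n
instance (n : Int) (out : Int) : Decidable (Spec_solution n out) := by unfold Spec_solution; infer_instance

-- ===== CLAIM (what is proved, stated in full; the proofs are below) =====
def Claim_equal_solution : Prop := ∀ (n : Int), Dom_solution n → Spec_solution n (solution n)

-- ===== LEMMAS AND PROOFS =====

-- closed form of the scanning loop: snap `a` down to the residue 2n mod 3
theorem solutionLoop_closed (n a : Int) :
    solutionLoop n a =
      (if a - (a - (2 * n) % 3) % 3 < 0 then (-1 : Int)
       else a - (a - (2 * n) % 3) % 3 + (n - 5 * (a - (a - (2 * n) % 3) % 3)) / 3) := by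
  induction a using solutionLoop.induct n with
  | case1 a ha tmp hdiv =>
      rw [solutionLoop]
      simp only [ha, dif_pos]
      have h3 : (0:Int) < 3 := by norm_num
      rw [if_pos (by simpa [tmp, PySem.Int.mod_eq_emod_of_pos h3] using hdiv)]
      rw [PySem.Int.floordiv_eq_ediv_of_pos h3]
      have hdiv' : (n - a * 5) % 3 = 0 := by
        simpa [tmp, PySem.Int.mod_eq_emod_of_pos h3] using hdiv
      split_ifs with h <;> omega
  | case2 a ha tmp hdiv ih =>
      rw [solutionLoop]
      simp only [ha, dif_pos]
      have h3 : (0:Int) < 3 := by norm_num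
      have hdiv' : ¬ (n - a * 5) % 3 = 0 := by
        simpa [tmp, PySem.Int.mod_eq_emod_of_pos h3] using hdiv
      rw [if_neg (by simpa [tmp, PySem.Int.mod_eq_emod_of_pos h3] using hdiv)]
      rw [ih]
      have k1 : (n - a * 5) % 3 = (a - 2 * n % 3) % 3 := by omega
      have k2 : (a - 1 - 2 * n % 3) % 3 = (a - 2 * n % 3 - 1) % 3 := by omega
      split_ifs with h1 h2 h2 <;> omega
  | case3 a ha =>
      rw [solutionLoop]
      rw [dif_neg ha]
      split_ifs with h
      · rfl
      · omega

-- ===== VERDICT (by name: the statement is the Claim_ definition above) =====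
theorem solution_spec : Claim_equal_solution := by
  intro n _
  unfold Spec_solution solution solution_alt
  split_ifs with h5
  · rfl
  · rw [solutionLoop_closed]
    have h3 : (0:Int) < 3 := by norm_num
    have h5p : (0:Int) < 5 := by norm_num
    simp only [PySem.Int.mod_eq_emod_of_pos h3, PySem.Int.floordiv_eq_ediv_of_pos h3,
      PySem.Int.floordiv_eq_ediv_of_pos h5p]
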